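-- pv_equiv track=rewrite | github.com/L-Red/adventofcode_solutions_wandercraft | day4/part2.py | convolution2d
-- ===== SOURCE A (Python) =====
-- def convolution2d(array):
--     filter = [[1, 1, 1], [1, 0, 1], [1, 1, 1]]
--     sum = 0;
--     m = len(array)
--     n = len(array[0])
--     new_array = [[0 for _ in range(n+2)] for _ in range(m+2)]
--     ret_array = [[0 for _ in range(n)] for _ in range(m)]
--     for i in range(1, m+1):
--         for j in range(1, n+1):
--             new_array[i][j] = array[i-1][j-1]
--
--     for i in range(1, m+1):
--         for j in range(1, n+1):
--             if new_array[i][j] == 0: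
--                 continue
--             temp_sum = 0
--             for k in range(3):
--                 for l in range(3):
--                     temp_sum += new_array[i+k-1][j+l-1] * filter[k][l]
--             ret_array[i-1][j-1] = temp_sum
--     return ret_array
-- ===== SOURCE B (Python) =====
-- def convolution2d(array):
--     m = len(array)
--     n = len(array[0])
--     # summed-area table: P[i][j] = sum of array[r][c] for r < i, c < j (c limited to the first n columns)
--     P = [[0] * (n + 1)]
--     for i in range(m):
--         prev = P[i]
--         row = [0]
--         s = 0
--         for j in range(n):
--             s += array[i][j]
--             row.append(prev[j + 1] + s)
--         P.append(row)
--
--     out = []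
--     for i in range(m):
--         top = P[max(0, i - 1)]
--         bot = P[min(m - 1, i + 1) + 1]
--         src = array[i]
--         orow = []
--         for j in range(n):
--             v = src[j]
--             if v == 0:
--                 orow.append(0)
--             else:
--                 c0 = max(0, j - 1)
--                 c1 = min(n - 1, j + 1) + 1
--                 orow.append(bot[c1] - top[c1] - bot[c0] + top[c0] - v)
--         out.append(orow)
--     return out
-- ===== Notes on version B (the rewrite author's own statement) =====
-- stated objective: faster
-- what changed: B builds a 2D summed-area (prefix-sum) table once and computes each cell's neighbor sum from four table lookups over the clamped 3x3 rectangle minus the center, instead of A's zero-padded copy plus a 3x3 filter loop per cell.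
import Mathlib
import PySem

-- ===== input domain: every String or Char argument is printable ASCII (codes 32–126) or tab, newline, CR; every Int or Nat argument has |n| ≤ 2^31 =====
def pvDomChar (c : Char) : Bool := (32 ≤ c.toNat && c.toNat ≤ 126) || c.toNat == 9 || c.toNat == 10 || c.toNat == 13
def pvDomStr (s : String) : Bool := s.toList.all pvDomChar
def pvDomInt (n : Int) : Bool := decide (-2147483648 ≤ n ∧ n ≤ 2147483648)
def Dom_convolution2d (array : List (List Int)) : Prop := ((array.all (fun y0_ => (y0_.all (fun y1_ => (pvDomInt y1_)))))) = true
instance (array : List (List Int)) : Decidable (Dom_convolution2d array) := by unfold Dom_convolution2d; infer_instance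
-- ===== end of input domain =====

-- B replaces A's per-cell 3x3 filter loop over a zero-padded copy by one summed-area
-- (2D prefix-sum) table and four lookups per cell (objective: faster by a constant factor).

-- ===== PORT A =====
-- shared total 2D indexing/assignment helpers (exact for the in-range accesses both
-- Pythons make on inputs satisfying Pre_; out-of-range accesses raise in Python and
-- are excluded by Pre_)
def pvGet2 (g : List (List Int)) (i j : Nat) : Int := (g.getD i []).getD j 0

def pvSet2 (g : List (List Int)) (i j : Nat) (v : Int) : List (List Int) :=
  g.set i ((g.getD i []).set j v)

def pvFilter : List (List Int) := [[1, 1, 1], [1, 0, 1], [1, 1, 1]]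

-- A's inner 3x3 accumulation: loops shifted to 0-based (A's padded i,j are our i+1,j+1,
-- so A's new_array[i+k-1][j+l-1] is our newA[(i)+k][(j)+l])
def pvTemp (g : List (List Int)) (i j : Nat) : Int :=
  (List.range 3).foldl (fun s k =>
    (List.range 3).foldl (fun s l =>
      s + pvGet2 g (i + k) (j + l) * pvGet2 pvFilter k l) s) 0

-- A's zero-padded copy new_array (loops 0-based: A's range(1,m+1) index i is our i+1)
def pvNewArray (array : List (List Int)) : List (List Int) :=
  let m := array.length
  let n := (array.headD []).length
  (List.range m).foldl (fun g i =>
    (List.range n).foldl (fun g j => pvSet2 g (i + 1) (j + 1) (pvGet2 array i j)) g)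
    (List.replicate (m + 2) (List.replicate (n + 2) 0))

def convolution2d (array : List (List Int)) : List (List Int) :=
  let m := array.length
  let n := (array.headD []).length   -- array[0]: IndexError on [] is excluded by Pre_
  let newA := pvNewArray array
  (List.range m).foldl (fun g i =>
    (List.range n).foldl (fun g j =>
      if pvGet2 newA (i + 1) (j + 1) == 0 then g
      else pvSet2 g i j (pvTemp newA i j)) g)
    (List.replicate m (List.replicate n 0))

-- ===== PORT B =====
-- B's inner row loop of the prefix table: state is (row built so far, running row sum s)
def pvPrefixRow (array : List (List Int)) (i : Nat) (prev : List Int) (n : Nat) :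
    List Int × Int :=
  (List.range n).foldl (fun rs j =>
    let s := rs.2 + pvGet2 array i j
    (rs.1 ++ [prev.getD (j + 1) 0 + s], s)) ([0], 0)

-- B's summed-area table P
def pvPrefix (array : List (List Int)) : List (List Int) :=
  let m := array.length
  let n := (array.headD []).length
  (List.range m).foldl (fun P i => P ++ [(pvPrefixRow array i (P.getD i []) n).1])
    [List.replicate (n + 1) 0]

def convolution2d_alt (array : List (List Int)) : List (List Int) :=
  let m := array.length
  let n := (array.headD []).length   -- array[0]: IndexError on [] is excluded by Pre_
  let P := pvPrefix array
  (List.range m).map (fun (i : Nat) =>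
    -- the Int row/col bounds are ≥ 0 here, so .toNat is exact
    let top := P.getD (max 0 ((i : Int) - 1)).toNat []
    let bot := P.getD ((min ((m : Int) - 1) ((i : Int) + 1)).toNat + 1) []
    let src := array.getD i []
    (List.range n).map (fun (j : Nat) =>
      let v := src.getD j 0
      if v == 0 then 0
      else
        let c0 := (max 0 ((j : Int) - 1)).toNat
        let c1 := (min ((n : Int) - 1) ((j : Int) + 1)).toNat + 1
        bot.getD c1 0 - top.getD c1 0 - bot.getD c0 0 + top.getD c0 0 - v))

-- ===== PRECONDITION & SPEC =====
-- Pre_ excludes exactly the inputs where Python A raises IndexError: the empty list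
-- (array[0]) and rows shorter than the first row (array[i-1][j-1] out of range).
def Pre_convolution2d (array : List (List Int)) : Prop :=
  array ≠ [] ∧ ∀ row ∈ array, (array.headD []).length ≤ row.length

instance (array : List (List Int)) : Decidable (Pre_convolution2d array) := by
  unfold Pre_convolution2d; infer_instance

def pvWitness_convolution2d : List (List Int) := [[1, 2], [3, 4]]

def Spec_convolution2d (array : List (List Int)) (out : List (List Int)) : Prop := out = convolution2d_alt array
instance (array : List (List Int)) (out : List (List Int)) : Decidable (Spec_convolution2d array out) := by unfold Spec_convolution2d; infer_instance

-- ===== CLAIM (what is proved, stated in full; the proofs are below) =====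
def Claim_equal_convolution2d : Prop := ∀ (array : List (List Int)), Dom_convolution2d array → Pre_convolution2d array → Spec_convolution2d array (convolution2d array)

-- ===== LEMMAS AND PROOFS =====

theorem rowfold_eq (c : Nat → Bool) (f : Nat → Int) (pre suf : List Int) (nn : Nat) :
    ∀ t ≤ nn,
    (List.range t).foldl (fun r j => if c j then r else r.set (pre.length + j) (f j))
        (pre ++ (List.replicate nn (0 : Int) ++ suf))
      = pre ++ (((List.range t).map (fun j => if c j then 0 else f j)
                  ++ List.replicate (nn - t) 0) ++ suf) := by
  intro t
  induction t with
  | zero => intro _; simp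
  | succ t ih =>
    intro h
    rw [List.range_succ, List.foldl_append, ih (by omega), List.map_append]
    simp only [List.foldl_cons, List.foldl_nil, List.map_cons, List.map_nil]
    have hrep : nn - t = (nn - (t + 1)) + 1 := by omega
    cases hc : c t with
    | true =>
      simp only [if_true]
      rw [hrep, List.replicate_succ]
      simp
    | false =>
      simp only [if_false, Bool.false_eq_true]
      rw [List.set_append, if_neg (by omega), Nat.add_sub_cancel_left,
          List.set_append, if_pos (by simp; omega),
          List.set_append, if_neg (by simp), List.length_map, List.length_range,
          Nat.sub_self, hrep, List.replicate_succ]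
      simp

theorem gridfold_cond (p : Nat) (c : Nat → Bool) (upd : List Int → Nat → List Int) :
    ∀ (js : List Nat) (g : List (List Int)), p < g.length →
    js.foldl (fun g j => if c j then g else g.set p (upd (g.getD p []) j)) g
      = g.set p (js.foldl (fun r j => if c j then r else upd r j) (g.getD p [])) := by
  intro js
  induction js with
  | nil =>
    intro g hp
    simp only [List.foldl_nil]
    rw [List.getD_eq_getElem g [] hp, List.set_getElem_self]
  | cons j js ih =>
    intro g hp
    simp only [List.foldl_cons]
    cases hc : c j with
    | true => simp only [if_true]; exact ih g hp
    | false =>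
      simp only [if_false, Bool.false_eq_true]
      rw [ih _ (by simpa using hp)]
      have hget : (g.set p (upd (g.getD p []) j)).getD p [] = upd (g.getD p []) j := by
        rw [List.getD_eq_getElem _ _ (by simpa using hp), List.getElem_set_self]
      rw [hget, List.set_set]

theorem outer_fold (F : List (List Int) → Nat → List (List Int))
    (R : Nat → List Int → List Int) (off M : Nat) (z : List Int)
    (pre suf : List (List Int)) (hpre : pre.length = off)
    (hF : ∀ g i, off + i < g.length → F g i = g.set (off + i) (R i (g.getD (off + i) [])))
    : ∀ t ≤ M,
    (List.range t).foldl F (pre ++ (List.replicate M z ++ suf))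
      = pre ++ (((List.range t).map (fun i => R i z) ++ List.replicate (M - t) z) ++ suf) := by
  intro t
  induction t with
  | zero => intro _; simp
  | succ t ih =>
    intro h
    rw [List.range_succ, List.foldl_append, ih (by omega), List.map_append]
    simp only [List.foldl_cons, List.foldl_nil, List.map_cons, List.map_nil]
    have hrep : M - t = (M - (t + 1)) + 1 := by omega
    have hlen : off + t < (pre ++ ((List.range t).map (fun i => R i z)
        ++ List.replicate (M - t) z ++ suf)).length := by
      simp [hpre]; omega
    rw [hF _ t hlen]
    have hget : (pre ++ ((List.range t).map (fun i => R i z)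
        ++ List.replicate (M - t) z ++ suf)).getD (off + t) [] = z := by
      rw [List.getD_eq_getElem _ _ hlen,
          List.getElem_append_right (by omega : pre.length ≤ off + t)]
      rw [List.getElem_append_left (by simp [hpre]; omega)]
      rw [List.getElem_append_right (by simp [hpre])]
      simp [hpre]
    rw [hget, List.set_append, if_neg (by omega), hpre, Nat.add_sub_cancel_left,
        List.set_append, if_pos (by simp; omega),
        List.set_append, if_neg (by simp), List.length_map, List.length_range,
        Nat.sub_self, hrep, List.replicate_succ]
    simp
def padG (array : List (List Int)) (m n r c : Nat) : Int :=
  if 1 ≤ r ∧ r ≤ m ∧ 1 ≤ c ∧ c ≤ n then pvGet2 array (r - 1) (c - 1) else 0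

theorem newA_eq (array : List (List Int)) :
    pvNewArray array
      = List.replicate ((array.headD []).length + 2) 0
          :: ((List.range array.length).map (fun i =>
                0 :: ((List.range (array.headD []).length).map (fun j => pvGet2 array i j) ++ [0]))
              ++ [List.replicate ((array.headD []).length + 2) 0]) := by
  set m := array.length with hm
  set n := (array.headD []).length with hn
  have hz : List.replicate (n + 2) (0 : Int)
      = [0] ++ (List.replicate n 0 ++ [0]) := by
    rw [List.replicate_succ, show n + 1 = n + 1 from rfl, List.replicate_succ']
    simp
  have hinit : List.replicate (m + 2) (List.replicate (n + 2) (0 : Int))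
      = [List.replicate (n + 2) 0] ++ (List.replicate m (List.replicate (n + 2) 0)
          ++ [List.replicate (n + 2) 0]) := by
    generalize List.replicate (n + 2) (0 : Int) = x
    rw [List.replicate_succ, List.replicate_succ']
    simp
  have hrow : ∀ i : Nat,
      (List.range n).foldl (fun r j => r.set (j + 1) (pvGet2 array i j))
          (List.replicate (n + 2) 0)
        = 0 :: ((List.range n).map (fun j => pvGet2 array i j) ++ [0]) := by
    intro i
    have hfun : (fun (r : List Int) j => r.set (j + 1) (pvGet2 array i j))
        = (fun r j => if (fun _ => false) j then r
            else r.set (([(0 : Int)]).length + j) (pvGet2 array i j)) := by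
      funext r j; simp [Nat.add_comm]
    rw [hfun, hz, rowfold_eq _ _ _ _ n n le_rfl]
    simp
  have h := outer_fold
    (fun g i => (List.range n).foldl (fun g j => pvSet2 g (i + 1) (j + 1) (pvGet2 array i j)) g)
    (fun i r => (List.range n).foldl (fun r j => r.set (j + 1) (pvGet2 array i j)) r)
    1 m (List.replicate (n + 2) 0) [List.replicate (n + 2) 0] [List.replicate (n + 2) 0] rfl
    (by
      intro g i hlen
      beta_reduce
      have hfun : (fun (g : List (List Int)) j => pvSet2 g (i + 1) (j + 1) (pvGet2 array i j))
          = (fun g j => if (fun _ => false) j then g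
              else g.set (i + 1) ((g.getD (i + 1) []).set (j + 1) (pvGet2 array i j))) := by
        funext g j; simp [pvSet2]
      rw [hfun, gridfold_cond (i + 1) (fun _ => false)
            (fun r j => r.set (j + 1) (pvGet2 array i j)) _ g (by omega)]
      simp [Nat.add_comm]) m le_rfl
  rw [pvNewArray, ← hm, ← hn, hinit, h]
  simp only [Nat.sub_self, List.replicate_zero, List.append_nil, List.singleton_append]
  congr 2
  apply List.map_congr_left
  intro i _
  exact hrow i
theorem getD_replicate_zero (k c : Nat) : (List.replicate k (0 : Int)).getD c 0 = 0 := by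
  by_cases h : c < k
  · rw [List.getD_eq_getElem _ _ (by simpa using h)]; simp
  · rw [List.getD_eq_default _ _ (by simpa using not_lt.mp h)]

theorem get_newA (array : List (List Int)) (r c : Nat) :
    pvGet2 (pvNewArray array) r c
      = padG array array.length (array.headD []).length r c := by
  set m := array.length with hm
  set n := (array.headD []).length with hn
  rw [newA_eq, ← hm, ← hn]
  set rowf : Nat → List Int :=
    fun i => 0 :: ((List.range n).map (fun j => pvGet2 array i j) ++ [0]) with hrowf
  set L : List (List Int) := (List.range m).map rowf ++ [List.replicate (n + 2) 0] with hL
  have hLlen : L.length = m + 1 := by simp [hL]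
  unfold pvGet2
  cases r with
  | zero =>
    rw [List.getD_cons_zero, getD_replicate_zero, padG, if_neg (by omega)]
  | succ i =>
    rw [List.getD_cons_succ]
    by_cases him : i < m
    · have h1 : L.getD i [] = rowf i := by
        rw [List.getD_eq_getElem _ _ (by omega)]
        simp only [hL]
        rw [List.getElem_append_left (by simpa using him), List.getElem_map, List.getElem_range]
      rw [h1, hrowf]
      cases c with
      | zero => rw [List.getD_cons_zero, padG, if_neg (by omega)]
      | succ j =>
        rw [List.getD_cons_succ]
        by_cases hjn : j < n
        · rw [List.getD_eq_getElem _ _ (by simp; omega),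
              List.getElem_append_left (by simpa using hjn), List.getElem_map, List.getElem_range,
              padG, if_pos (by refine ⟨by omega, by omega, by omega, by omega⟩)]
          simp
        · by_cases hj2 : j = n
          · subst hj2
            rw [List.getD_eq_getElem _ _ (by simp),
                List.getElem_append_right (by simp), padG, if_neg (by omega)]
            simp
          · rw [List.getD_eq_default _ _ (by simp; omega), padG, if_neg (by omega)]
    · by_cases hi2 : i = m
      · subst hi2
        have h1 : L.getD m [] = List.replicate (n + 2) 0 := by
          rw [List.getD_eq_getElem _ _ (by omega)]
          simp only [hL]
          rw [List.getElem_append_right (by simp)]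
          simp
        rw [h1, getD_replicate_zero, padG, if_neg (by omega)]
      · rw [List.getD_eq_default L [] (by omega), padG, if_neg (by omega)]
        rfl
theorem retA_eq (array : List (List Int)) :
    convolution2d array
      = (List.range array.length).map (fun i =>
          (List.range (array.headD []).length).map (fun j =>
            if pvGet2 (pvNewArray array) (i + 1) (j + 1) == 0 then 0
            else pvTemp (pvNewArray array) i j)) := by
  set m := array.length with hm
  set n := (array.headD []).length with hn
  set newA := pvNewArray array with hnewA
  have hrow : ∀ i : Nat,
      (List.range n).foldl (fun r j =>
          if pvGet2 newA (i + 1) (j + 1) == 0 then r else r.set j (pvTemp newA i j))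
          (List.replicate n 0)
        = (List.range n).map (fun j =>
            if pvGet2 newA (i + 1) (j + 1) == 0 then 0 else pvTemp newA i j) := by
    intro i
    have hfun : (fun (r : List Int) j =>
          if pvGet2 newA (i + 1) (j + 1) == 0 then r else r.set j (pvTemp newA i j))
        = (fun r j => if (fun j => pvGet2 newA (i + 1) (j + 1) == 0) j then r
            else r.set (([] : List Int).length + j) (pvTemp newA i j)) := by
      funext r j; simp
    rw [hfun, show List.replicate n (0 : Int) = [] ++ (List.replicate n 0 ++ []) by simp,
        rowfold_eq _ _ _ _ n n le_rfl]
    simp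
  have h := outer_fold
    (fun g i => (List.range n).foldl (fun g j =>
        if pvGet2 newA (i + 1) (j + 1) == 0 then g else pvSet2 g i j (pvTemp newA i j)) g)
    (fun i r => (List.range n).foldl (fun r j =>
        if pvGet2 newA (i + 1) (j + 1) == 0 then r else r.set j (pvTemp newA i j)) r)
    0 m (List.replicate n 0) [] [] rfl
    (by
      intro g i hlen
      beta_reduce
      have hfun : (fun (g : List (List Int)) j =>
            if pvGet2 newA (i + 1) (j + 1) == 0 then g else pvSet2 g i j (pvTemp newA i j))
          = (fun g j => if (fun j => pvGet2 newA (i + 1) (j + 1) == 0) j then g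
              else g.set i ((g.getD i []).set j (pvTemp newA i j))) := by
        funext g j; simp [pvSet2]
      rw [hfun, gridfold_cond i (fun j => pvGet2 newA (i + 1) (j + 1) == 0)
            (fun r j => r.set j (pvTemp newA i j)) _ g (by omega)]
      simp) m le_rfl
  simp only [List.nil_append, List.append_nil] at h
  rw [convolution2d, ← hm, ← hn, ← hnewA, h]
  simp only [Nat.sub_self, List.replicate_zero, List.append_nil]
  apply List.map_congr_left
  intro i _
  exact hrow i
def rpf (array : List (List Int)) (r j : Nat) : Int := ∑ c ∈ Finset.range j, pvGet2 array r c
def Sf (array : List (List Int)) (i j : Nat) : Int := ∑ r ∈ Finset.range i, rpf array r j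

theorem Sf_succ (array : List (List Int)) (i j : Nat) :
    Sf array (i + 1) j = Sf array i j + rpf array i j := by
  simp [Sf, Finset.sum_range_succ]

theorem rpf_succ (array : List (List Int)) (r j : Nat) :
    rpf array r (j + 1) = rpf array r j + pvGet2 array r j := by
  simp [rpf, Finset.sum_range_succ]

theorem prefixRow_char (array : List (List Int)) (i n : Nat) (prev : List Int)
    (hprev : ∀ jj, jj < n → prev.getD (jj + 1) 0 = Sf array i (jj + 1)) :
    ∀ t ≤ n,
    (List.range t).foldl (fun rs j =>
        let s := rs.2 + pvGet2 array i j
        (rs.1 ++ [prev.getD (j + 1) 0 + s], s))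
      (([0], 0) : List Int × Int)
      = ((List.range (t + 1)).map (fun j => Sf array i j + rpf array i j), rpf array i t) := by
  intro t
  induction t with
  | zero =>
    intro _
    simp [rpf, Sf]
  | succ t ih =>
    intro h
    rw [List.range_succ, List.foldl_append, ih (by omega)]
    simp only [List.foldl_cons, List.foldl_nil]
    refine Prod.ext ?_ ?_
    · simp only [hprev t (by omega), ← rpf_succ]
      conv_rhs => rw [List.range_succ]
      rw [List.map_append]
      simp
    · simp only [← rpf_succ]
theorem pvPrefix_eq (array : List (List Int)) :
    pvPrefix array
      = (List.range (array.length + 1)).map (fun i =>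
          (List.range ((array.headD []).length + 1)).map (fun j => Sf array i j)) := by
  set m := array.length with hm
  set n := (array.headD []).length with hn
  have hstep : ∀ t ≤ m,
      (List.range t).foldl (fun P i => P ++ [(pvPrefixRow array i (P.getD i []) n).1])
          [List.replicate (n + 1) 0]
        = (List.range (t + 1)).map (fun i => (List.range (n + 1)).map (fun j => Sf array i j)) := by
    intro t
    induction t with
    | zero =>
      intro _
      have h0 : (List.range (n + 1)).map (fun j => Sf array 0 j)
          = List.replicate (n + 1) (0 : Int) := by
        rw [List.eq_replicate_iff]
        refine ⟨by simp, ?_⟩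
        intro b hb
        simp only [List.mem_map] at hb
        obtain ⟨j, _, rfl⟩ := hb
        simp [Sf]
      simp only [List.range_zero, List.foldl_nil, zero_add, List.range_one, List.map_cons,
        List.map_nil, h0]
    | succ t ih =>
      intro h
      rw [List.range_succ, List.foldl_append, ih (by omega)]
      simp only [List.foldl_cons, List.foldl_nil]
      have hget : ((List.range (t + 1)).map (fun i =>
            (List.range (n + 1)).map (fun j => Sf array i j))).getD t []
          = (List.range (n + 1)).map (fun j => Sf array t j) := by
        rw [List.getD_eq_getElem _ _ (by simp), List.getElem_map, List.getElem_range]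
      rw [hget]
      have hrow : (pvPrefixRow array t ((List.range (n + 1)).map (fun j => Sf array t j)) n).1
          = (List.range (n + 1)).map (fun j => Sf array (t + 1) j) := by
        rw [pvPrefixRow, prefixRow_char array t n _
              (by intro jj hjj
                  rw [List.getD_eq_getElem _ _
                        (by simpa using Nat.add_lt_add_right hjj 1), List.getElem_map,
                      List.getElem_range])
              n le_rfl]
        apply List.map_congr_left
        intro j _
        rw [Sf_succ]
      rw [hrow]
      conv_rhs => rw [show List.range (t + 1 + 1) = List.range (t + 1) ++ [t + 1] from
        List.range_succ]
      rw [List.map_append]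
      simp
  rw [pvPrefix, ← hm, ← hn]
  exact hstep m le_rfl
theorem Sf_sub (array : List (List Int)) (a b j : Nat) (h : a ≤ b) :
    Sf array b j - Sf array a j = ∑ r ∈ Finset.Ico a b, rpf array r j := by
  rw [Finset.sum_Ico_eq_sub _ h]; rfl

theorem rpf_sub (array : List (List Int)) (r a b : Nat) (h : a ≤ b) :
    rpf array r b - rpf array r a = ∑ c ∈ Finset.Ico a b, pvGet2 array r c := by
  rw [Finset.sum_Ico_eq_sub _ h]; rfl

theorem clamp1 (F : Nat → Int) (M i : Nat) (hi : i < M) (h0 : F 0 = 0)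
    (hM : ∀ r, M + 1 ≤ r → F r = 0) :
    ∑ r ∈ Finset.Ico i (i + 3), F r
      = ∑ r ∈ Finset.Ico (i - 1) (min (M - 1) (i + 1) + 1), F (r + 1) := by
  have hshrink : ∑ r ∈ Finset.Ico i (i + 3), F r
      = ∑ r ∈ Finset.Ico (max 1 i) (min (M + 1) (i + 3)), F r := by
    symm
    apply Finset.sum_subset
    · apply Finset.Ico_subset_Ico (by omega) (by omega)
    · intro x hx hnx
      simp only [Finset.mem_Ico] at hx hnx
      rcases (by omega : x = 0 ∨ M + 1 ≤ x) with h | h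
      · rw [h, h0]
      · exact hM x h
  rw [hshrink, Finset.sum_Ico_eq_sum_range, Finset.sum_Ico_eq_sum_range]
  have hlen : min (M + 1) (i + 3) - max 1 i = min (M - 1) (i + 1) + 1 - (i - 1) := by omega
  rw [hlen]
  apply Finset.sum_congr rfl
  intro k hk
  simp only [Finset.mem_range] at hk
  congr 1
  omega

theorem core (array : List (List Int)) (m n i j : Nat) (him : i < m) (hjn : j < n) :
    ∑ k ∈ Finset.range 3, ∑ l ∈ Finset.range 3, padG array m n (i + k) (j + l)
      = Sf array (min (m - 1) (i + 1) + 1) (min (n - 1) (j + 1) + 1)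
        - Sf array (i - 1) (min (n - 1) (j + 1) + 1)
        - Sf array (min (m - 1) (i + 1) + 1) (j - 1)
        + Sf array (i - 1) (j - 1) := by
  have hR : i - 1 ≤ min (m - 1) (i + 1) + 1 := by omega
  have hC : j - 1 ≤ min (n - 1) (j + 1) + 1 := by omega
  have hrhs : Sf array (min (m - 1) (i + 1) + 1) (min (n - 1) (j + 1) + 1)
        - Sf array (i - 1) (min (n - 1) (j + 1) + 1)
        - Sf array (min (m - 1) (i + 1) + 1) (j - 1)
        + Sf array (i - 1) (j - 1)
      = ∑ r ∈ Finset.Ico (i - 1) (min (m - 1) (i + 1) + 1),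
          ∑ c ∈ Finset.Ico (j - 1) (min (n - 1) (j + 1) + 1), pvGet2 array r c := by
    have e1 := Sf_sub array (i - 1) (min (m - 1) (i + 1) + 1) (min (n - 1) (j + 1) + 1) hR
    have e2 := Sf_sub array (i - 1) (min (m - 1) (i + 1) + 1) (j - 1) hR
    have : Sf array (min (m - 1) (i + 1) + 1) (min (n - 1) (j + 1) + 1)
        - Sf array (i - 1) (min (n - 1) (j + 1) + 1)
        - Sf array (min (m - 1) (i + 1) + 1) (j - 1)
        + Sf array (i - 1) (j - 1)
        = (Sf array (min (m - 1) (i + 1) + 1) (min (n - 1) (j + 1) + 1)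
            - Sf array (i - 1) (min (n - 1) (j + 1) + 1))
          - (Sf array (min (m - 1) (i + 1) + 1) (j - 1)
            - Sf array (i - 1) (j - 1)) := by ring
    rw [this, e1, e2, ← Finset.sum_sub_distrib]
    apply Finset.sum_congr rfl
    intro r _
    exact rpf_sub array r (j - 1) (min (n - 1) (j + 1) + 1) hC
  rw [hrhs]
  have hrows : ∑ k ∈ Finset.range 3, ∑ l ∈ Finset.range 3, padG array m n (i + k) (j + l)
      = ∑ r ∈ Finset.Ico i (i + 3), ∑ l ∈ Finset.range 3, padG array m n r (j + l) := by
    rw [Finset.sum_Ico_eq_sum_range]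
    simp
  rw [hrows]
  rw [clamp1 (fun r => ∑ l ∈ Finset.range 3, padG array m n r (j + l)) m i him
        (by simp [padG]) (by intro r hr; simp only; apply Finset.sum_eq_zero; intro l _;
                             rw [padG, if_neg (by omega)])]
  apply Finset.sum_congr rfl
  intro r hr
  simp only [Finset.mem_Ico] at hr
  have hcols : ∑ l ∈ Finset.range 3, padG array m n (r + 1) (j + l)
      = ∑ c ∈ Finset.Ico j (j + 3), padG array m n (r + 1) c := by
    rw [Finset.sum_Ico_eq_sum_range]
    simp
  rw [hcols]
  rw [clamp1 (fun c => padG array m n (r + 1) c) n j hjn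
        (by simp only [padG]; rw [if_neg (by omega)])
        (by intro c hc; simp only [padG]; rw [if_neg (by omega)])]
  apply Finset.sum_congr rfl
  intro c hc
  simp only [Finset.mem_Ico] at hc
  rw [padG, if_pos (by refine ⟨by omega, by omega, by omega, by omega⟩)]
  simp
theorem temp_eq (array : List (List Int)) (i j : Nat) :
    pvTemp (pvNewArray array) i j
      = (∑ k ∈ Finset.range 3, ∑ l ∈ Finset.range 3,
          padG array array.length (array.headD []).length (i + k) (j + l))
        - padG array array.length (array.headD []).length (i + 1) (j + 1) := by
  have hg := get_newA array
  rw [pvTemp, show List.range 3 = [0, 1, 2] from rfl]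
  simp only [List.foldl_cons, List.foldl_nil, hg]
  rw [Finset.sum_range_succ, Finset.sum_range_succ, Finset.sum_range_one,
      Finset.sum_range_succ, Finset.sum_range_succ, Finset.sum_range_one,
      Finset.sum_range_succ, Finset.sum_range_succ, Finset.sum_range_one,
      Finset.sum_range_succ, Finset.sum_range_succ, Finset.sum_range_one]
  norm_num [pvGet2, pvFilter]
  ring
theorem AB_eq (array : List (List Int)) : convolution2d array = convolution2d_alt array := by
  set m := array.length with hm
  set n := (array.headD []).length with hn
  rw [retA_eq, ← hm, ← hn]
  simp only [convolution2d_alt, ← hm, ← hn, pvPrefix_eq]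
  apply List.map_congr_left
  intro i hi
  rw [List.mem_range] at hi
  apply List.map_congr_left
  intro j hj
  rw [List.mem_range] at hj
  have hM1 : (1 : Nat) ≤ m := by omega
  have hN1 : (1 : Nat) ≤ n := by omega
  have hR0 : (max 0 ((i : Int) - 1)).toNat = i - 1 := by omega
  have hR1 : (min ((m : Int) - 1) ((i : Int) + 1)).toNat = min (m - 1) (i + 1) := by omega
  have hC0 : (max 0 ((j : Int) - 1)).toNat = j - 1 := by omega
  have hC1 : (min ((n : Int) - 1) ((j : Int) + 1)).toNat = min (n - 1) (j + 1) := by omega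
  have hgetrow : ∀ r : Nat, r ≤ m →
      ((List.range (m + 1)).map (fun r => (List.range (n + 1)).map (fun c => Sf array r c))).getD r []
        = (List.range (n + 1)).map (fun c => Sf array r c) := by
    intro r hr
    rw [List.getD_eq_getElem _ _ (by simp; omega), List.getElem_map, List.getElem_range]
  have hgetcell : ∀ r c : Nat, r ≤ m → c ≤ n →
      (((List.range (m + 1)).map (fun r => (List.range (n + 1)).map (fun c => Sf array r c))).getD r []).getD c 0
        = Sf array r c := by
    intro r c hr hc
    rw [hgetrow r hr, List.getD_eq_getElem _ _ (by simp; omega), List.getElem_map,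
        List.getElem_range]
  have hcent : pvGet2 (pvNewArray array) (i + 1) (j + 1) = pvGet2 array i j := by
    rw [get_newA, ← hm, ← hn, padG, if_pos (by refine ⟨by omega, by omega, by omega, by omega⟩)]
    simp
  have hv : (array.getD i []).getD j 0 = pvGet2 array i j := rfl
  rw [hcent, hR0, hR1, hC0, hC1, hv]
  by_cases hz : pvGet2 array i j == 0
  · simp [hz]
  · simp only [hz, if_false, Bool.false_eq_true]
    rw [hgetcell _ _ (by omega) (by omega), hgetcell _ _ (by omega) (by omega),
        hgetcell _ _ (by omega) (by omega), hgetcell _ _ (by omega) (by omega)]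
    rw [temp_eq, ← hm, ← hn,
        core array m n i j hi hj,
        padG, if_pos (by refine ⟨by omega, by omega, by omega, by omega⟩)]
    simp only [Nat.add_sub_cancel]

-- ===== VERDICT (by name: the statement is the Claim_ definition above) =====
theorem convolution2d_spec : Claim_equal_convolution2d := by
  intro array _ _
  unfold Spec_convolution2d
  exact AB_eq array
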